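-- pv_equiv track=rewrite | github.com/VictorDron/StoneLive.py | analysis/base_1.py | getOccurrenceByDate
-- ===== SOURCE A (Python) =====
-- def countBases(data):
--     count = {}
--     for row in data:
--         base = row['base']
--         if base in count:
--             count[base] += 1
--         else:
--             count[base] = 1
--     return count
--
-- def getOccurrenceByDate(data, date):
--     filteredData = [row for row in data if row['date'] == date]
--     statesCount = countBasesByState(filteredData)
--     basesCount = countBases(filteredData)
--
--     return {
--         'states': statesCount,
--         'bases': basesCount
--     }
--
-- def countBasesByState(data):
--     stateBases = {}
--     for row in data:
--         state = row['country_state']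
--         base = row['base']
--         if state not in stateBases:
--             stateBases[state] = set()
--         stateBases[state].add(base)
--     stateBaseCount = {state: len(bases) for state, bases in stateBases.items()}
--     return stateBaseCount
-- ===== SOURCE B (Python) =====
-- def getOccurrenceByDate(data, date):
--     # Declarative reformulation: no incremental counter dicts or per-state sets.
--     # Collect the matching (base, state) pairs once, derive the key orders by
--     # ordered dedup (dict.fromkeys), and compute every count by an independent
--     # scan: a base's count is how often it occurs among the pairs, a state's
--     # count is how many distinct pairs carry that state.
--     pairs = [(row['base'], row['country_state']) for row in data if row['date'] == date]
--     baseOrder = list(dict.fromkeys(b for b, _ in pairs))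
--     distinctPairs = list(dict.fromkeys(pairs))
--     stateOrder = list(dict.fromkeys(s for _, s in pairs))
--     return {
--         'states': {s: len([p for p in distinctPairs if p[1] == s]) for s in stateOrder},
--         'bases': {b: len([p for p in pairs if p[0] == b]) for b in baseOrder},
--     }
-- ===== Notes on version B (the rewrite author's own statement) =====
-- stated objective: alternative
-- what changed: A builds its results incrementally: it mutates a per-base counter dict and a dict of per-state sets row by row and then sizes the sets; B is declarative and keeps no accumulating dict or set at all: it materializes the matching (base,state) pairs once, obtains each key order by ordered dedup (dict.fromkeys), and computes every count by an independent scan (a base's count = its occurrences among the pairs, a state's count = the number of distinct pairs carrying that state).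
import Mathlib
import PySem

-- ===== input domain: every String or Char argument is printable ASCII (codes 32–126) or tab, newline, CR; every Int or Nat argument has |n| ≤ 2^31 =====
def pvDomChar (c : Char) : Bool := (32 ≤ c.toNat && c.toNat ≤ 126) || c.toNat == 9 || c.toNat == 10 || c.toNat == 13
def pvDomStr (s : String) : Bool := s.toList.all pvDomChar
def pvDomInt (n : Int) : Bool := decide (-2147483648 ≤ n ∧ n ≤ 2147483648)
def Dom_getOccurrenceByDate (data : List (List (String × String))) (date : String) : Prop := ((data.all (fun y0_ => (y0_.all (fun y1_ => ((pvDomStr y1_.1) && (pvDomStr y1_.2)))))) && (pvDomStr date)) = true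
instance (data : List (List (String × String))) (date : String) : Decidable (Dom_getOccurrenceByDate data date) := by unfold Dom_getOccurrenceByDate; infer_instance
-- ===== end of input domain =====

-- B replaces A's incremental counter-dict / dict-of-sets accumulation by a declarative
-- dedup-then-count-per-key computation over the matching (base,state) pairs; objective: alternative.


-- ===== PORT A =====
-- row[k]: first-match lookup in the row's association list; total form, used only under Pre_
def pvRowGet (row : List (String × String)) (k : String) : String :=
  ((PySem.Dict.mk row).get? k).getD ""

def pvCountBases (rows : List (List (String × String))) : PySem.Dict String Int :=
  rows.foldl (fun count row =>
    let base := pvRowGet row "base"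
    if count.contains base then count.insert base (count.getD base 0 + 1)
    else count.insert base 1) PySem.Dict.empty

def pvCountBasesByState (rows : List (List (String × String))) : PySem.Dict String (PySem.Set String) :=
  rows.foldl (fun stateBases row =>
    let state := pvRowGet row "country_state"
    let base := pvRowGet row "base"
    let stateBases' := if stateBases.contains state then stateBases
                       else stateBases.insert state PySem.Set.empty
    stateBases'.insert state
      (PySem.Set.add ((stateBases'.get? state).getD PySem.Set.empty) base)) PySem.Dict.empty

def getOccurrenceByDate (data : List (List (String × String))) (date : String) : List (String × List (String × Int)) :=
  let filteredData := data.filter (fun row => pvRowGet row "date" == date)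
  let statesCount := (pvCountBasesByState filteredData).items.map (fun p => (p.1, PySem.Set.len p.2))
  let basesCount := (pvCountBases filteredData).items
  [("states", statesCount), ("bases", basesCount)]

-- ===== PORT B =====
def getOccurrenceByDate_alt (data : List (List (String × String))) (date : String) : List (String × List (String × Int)) :=
  let pairs := (data.filter (fun row => pvRowGet row "date" == date)).map
      (fun row => (pvRowGet row "base", pvRowGet row "country_state"))
  let baseOrder := PySem.List.dedup (pairs.map (fun p => p.1))
  let distinctPairs := PySem.List.dedup pairs
  let stateOrder := PySem.List.dedup (pairs.map (fun p => p.2))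
  let states := stateOrder.map (fun s => (s, ((distinctPairs.filter (fun p => p.2 == s)).length : Int)))
  let bases := baseOrder.map (fun b => (b, ((pairs.filter (fun p => p.1 == b)).length : Int)))
  [("states", states), ("bases", bases)]

-- ===== PRECONDITION & SPEC =====
-- A raises KeyError on a row without a 'date' key, or on a date-matching row without
-- 'base' or 'country_state'; Pre_ excludes exactly those inputs (B raises there too).
def Pre_getOccurrenceByDate (data : List (List (String × String))) (date : String) : Prop :=
  ∀ row ∈ data, (row.lookup "date").isSome ∧
    (row.lookup "date" = some date → (row.lookup "base").isSome ∧ (row.lookup "country_state").isSome)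
instance (data : List (List (String × String))) (date : String) : Decidable (Pre_getOccurrenceByDate data date) := by unfold Pre_getOccurrenceByDate; infer_instance

def pvWitness_getOccurrenceByDate : (List (List (String × String))) × String :=
  ([[("date", "d1"), ("base", "b1"), ("country_state", "s1")], [("date", "d2")]], "d1")

def Spec_getOccurrenceByDate (data : List (List (String × String))) (date : String) (out : List (String × List (String × Int))) : Prop := out = getOccurrenceByDate_alt data date
instance (data : List (List (String × String))) (date : String) (out : List (String × List (String × Int))) : Decidable (Spec_getOccurrenceByDate data date out) := by unfold Spec_getOccurrenceByDate; infer_instance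

-- ===== CLAIM (what is proved, stated in full; the proofs are below) =====
def Claim_equal_getOccurrenceByDate : Prop := ∀ (data : List (List (String × String))) (date : String), Dom_getOccurrenceByDate data date → Pre_getOccurrenceByDate data date → Spec_getOccurrenceByDate data date (getOccurrenceByDate data date)

-- ===== LEMMAS AND PROOFS =====

-- Set.add commutes with filter.
theorem pvAdd_filter {α : Type} [BEq α] [LawfulBEq α] (q : α → Bool) (t : PySem.Set α) (x : α) :
    (PySem.Set.add t x).filter q =
      if q x then PySem.Set.add (t.filter q) x else t.filter q := by
  by_cases hx : x ∈ t
  · rw [PySem.Set.add_of_mem hx]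
    by_cases hq : q x = true
    · rw [if_pos hq, PySem.Set.add_of_mem (List.mem_filter.mpr ⟨hx, hq⟩)]
    · simp [hq]
  · rw [PySem.Set.add_of_not_mem hx, List.filter_append]
    by_cases hq : q x = true
    · have hx' : x ∉ t.filter q := fun h => hx (List.mem_filter.mp h).1
      rw [if_pos hq, PySem.Set.add_of_not_mem hx']
      simp [hq]
    · simp [hq]

-- Set.update (hence Set.ofList) commutes with filter.
theorem pvUpdate_filter {α : Type} [BEq α] [LawfulBEq α] (q : α → Bool) :
    ∀ (l : List α) (t : PySem.Set α),
      (PySem.Set.update t l).filter q = PySem.Set.update (t.filter q) (l.filter q)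
  | [], t => rfl
  | x :: l, t => by
    show (PySem.Set.update (PySem.Set.add t x) l).filter q = _
    rw [pvUpdate_filter q l (PySem.Set.add t x), pvAdd_filter]
    by_cases hq : q x = true
    · simp only [hq, if_true, List.filter_cons]
      rfl
    · simp [hq]

theorem pvOfList_filter {α : Type} [BEq α] [LawfulBEq α] (q : α → Bool) (l : List α) :
    (PySem.Set.ofList l).filter q = PySem.Set.ofList (l.filter q) := by
  have h := pvUpdate_filter q l PySem.Set.empty
  simpa [PySem.Set.ofList, PySem.Set.update, PySem.Set.empty] using h

-- Set.add commutes with an injective map.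
theorem pvAdd_map {α β : Type} [BEq α] [LawfulBEq α] [BEq β] [LawfulBEq β]
    (f : α → β) (hf : Function.Injective f) (t : PySem.Set α) (x : α) :
    PySem.Set.add (t.map f) (f x) = (PySem.Set.add t x).map f := by
  by_cases hx : x ∈ t
  · rw [PySem.Set.add_of_mem hx, PySem.Set.add_of_mem (List.mem_map_of_mem hx)]
  · have hx' : f x ∉ t.map f := by
      intro h
      rcases List.mem_map.mp h with ⟨y, hy, hyx⟩
      exact hx (hf hyx ▸ hy)
    rw [PySem.Set.add_of_not_mem hx, PySem.Set.add_of_not_mem hx', List.map_append]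
    rfl

theorem pvUpdate_map {α β : Type} [BEq α] [LawfulBEq α] [BEq β] [LawfulBEq β]
    (f : α → β) (hf : Function.Injective f) :
    ∀ (l : List α) (t : PySem.Set α),
      PySem.Set.update (t.map f) (l.map f) = (PySem.Set.update t l).map f
  | [], t => rfl
  | x :: l, t => by
    show PySem.Set.update (PySem.Set.add (t.map f) (f x)) (l.map f) = _
    rw [pvAdd_map f hf, pvUpdate_map f hf l (PySem.Set.add t x)]
    rfl

theorem pvOfList_map {α β : Type} [BEq α] [LawfulBEq α] [BEq β] [LawfulBEq β]
    (f : α → β) (hf : Function.Injective f) (l : List α) :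
    PySem.Set.ofList (l.map f) = (PySem.Set.ofList l).map f := by
  have h := pvUpdate_map f hf l PySem.Set.empty
  simpa [PySem.Set.ofList, PySem.Set.update, PySem.Set.empty] using h

-- The value at key c after a modify-with-Set.add loop is the update of the start value
-- by the values of the rows keyed c, in order.
theorem pvGetD_modifyFold {α : Type} (key : α → String) (val : α → String) :
    ∀ (l : List α) (d : PySem.Dict String (PySem.Set String)) (c : String),
      (l.foldl (fun d r => d.modify (key r) PySem.Set.empty (fun t => PySem.Set.add t (val r))) d).getD c PySem.Set.empty
        = PySem.Set.update (d.getD c PySem.Set.empty) ((l.filter (fun r => key r == c)).map val)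
  | [], d, c => rfl
  | r :: l, d, c => by
    show (l.foldl _ (d.modify (key r) PySem.Set.empty (fun t => PySem.Set.add t (val r)))).getD c PySem.Set.empty = _
    rw [pvGetD_modifyFold key val l _ c, PySem.Dict.getD_modify, List.filter_cons]
    by_cases h : key r = c
    · simp only [h, beq_self_eq_true, if_true]
      rfl
    · have hb : (key r == c) = false := beq_eq_false_iff_ne.mpr h
      rw [if_neg (fun hc => h hc.symm), hb]
      simp

-- A's per-row states update IS a dict modify.
theorem pvStatesStep_eq :
    (fun (stateBases : PySem.Dict String (PySem.Set String)) (row : List (String × String)) =>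
      let state := pvRowGet row "country_state"
      let base := pvRowGet row "base"
      let stateBases' := if stateBases.contains state then stateBases
                         else stateBases.insert state PySem.Set.empty
      stateBases'.insert state
        (PySem.Set.add ((stateBases'.get? state).getD PySem.Set.empty) base))
    = (fun (stateBases : PySem.Dict String (PySem.Set String)) (row : List (String × String)) =>
        stateBases.modify (pvRowGet row "country_state") PySem.Set.empty
          (fun t => PySem.Set.add t (pvRowGet row "base"))) := by
  funext sb row
  by_cases h : sb.contains (pvRowGet row "country_state")
  · simp only [h, if_true, PySem.Dict.modify, PySem.Dict.getD_eq_get?_getD]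
  · have hc : sb.contains (pvRowGet row "country_state") = false := by simpa using h
    simp only [h, Bool.false_eq_true, if_false, PySem.Dict.modify,
      PySem.Dict.get?_insert_self, PySem.Dict.insert_insert_self, Option.getD_some,
      PySem.Dict.getD_of_not_contains _ _ hc]

-- A's per-row bases update IS the counter step.
theorem pvBasesStep_eq :
    (fun (count : PySem.Dict String Int) (row : List (String × String)) =>
      let base := pvRowGet row "base"
      if count.contains base then count.insert base (count.getD base 0 + 1)
      else count.insert base 1)
    = (fun (count : PySem.Dict String Int) (row : List (String × String)) =>
        count.insert (pvRowGet row "base") (count.getD (pvRowGet row "base") 0 + 1)) := by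
  funext d row
  by_cases h : d.contains (pvRowGet row "base")
  · simp [h]
  · have hc : d.contains (pvRowGet row "base") = false := by simpa using h
    simp [h, PySem.Dict.getD_of_not_contains _ _ hc]

-- The bases side: A's dict items = B's dedup-then-count list.
theorem pvBases_eq (X : List (List (String × String))) :
    (pvCountBases X).items
      = (PySem.List.dedup ((X.map (fun row => (pvRowGet row "base", pvRowGet row "country_state"))).map (fun p => p.1))).map
          (fun b => (b, (((X.map (fun row => (pvRowGet row "base", pvRowGet row "country_state"))).filter (fun p => p.1 == b)).length : Int))) := by
  unfold pvCountBases
  rw [pvBasesStep_eq]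
  have hfold : X.foldl (fun (count : PySem.Dict String Int) row =>
        count.insert (pvRowGet row "base") (count.getD (pvRowGet row "base") 0 + 1)) PySem.Dict.empty
      = (X.map (fun row => pvRowGet row "base")).foldl
          (fun count b => count.insert b (count.getD b 0 + 1)) PySem.Dict.empty := by
    rw [List.foldl_map]
  rw [hfold, PySem.Dict.foldl_insert_getD_add_one_eq_counter, PySem.Dict.items_counter,
    List.map_map, PySem.List.dedup_eq_ofList]
  have hcomp : List.map ((fun p => (p : String × String).1) ∘
        fun row => (pvRowGet row "base", pvRowGet row "country_state")) X
      = List.map (fun row => pvRowGet row "base") X := rfl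
  rw [hcomp]
  apply List.map_congr_left
  intro b _
  have hval : List.count b (X.map (fun row => pvRowGet row "base"))
      = (List.filter (fun p => p.1 == b)
          (X.map (fun row => (pvRowGet row "base", pvRowGet row "country_state")))).length := by
    rw [List.count_eq_countP, List.countP_map, ← List.countP_eq_length_filter, List.countP_map]
    rfl
  rw [hval]

-- The states side values: the set A accumulates for state s has exactly as many
-- elements as B's distinct pairs carrying s.
theorem pvStates_eq (X : List (List (String × String))) :
    (pvCountBasesByState X).items.map (fun p => (p.1, PySem.Set.len p.2))
      = (PySem.List.dedup ((X.map (fun row => (pvRowGet row "base", pvRowGet row "country_state"))).map (fun p => p.2))).map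
          (fun s => (s, (((PySem.List.dedup (X.map (fun row => (pvRowGet row "base", pvRowGet row "country_state")))).filter (fun p => p.2 == s)).length : Int))) := by
  unfold pvCountBasesByState
  rw [pvStatesStep_eq]
  have hnd : (X.foldl (fun (d : PySem.Dict String (PySem.Set String)) row =>
      d.modify (pvRowGet row "country_state") PySem.Set.empty
        (fun t => PySem.Set.add t (pvRowGet row "base"))) PySem.Dict.empty).keys.Nodup := by
    exact PySem.Dict.nodup_keys_foldl_modify_key X (fun row => pvRowGet row "country_state")
      PySem.Set.empty (fun d row => fun t => PySem.Set.add t (pvRowGet row "base"))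
      PySem.Dict.empty (by simp)
  rw [PySem.Dict.items_eq_map_keys _ hnd PySem.Set.empty, List.map_map,
    PySem.Dict.keys_foldl_modify_key, List.map_map]
  have hkeys : PySem.Set.update (PySem.Dict.empty : PySem.Dict String (PySem.Set String)).keys
        (X.map (fun row => pvRowGet row "country_state"))
      = PySem.List.dedup (List.map ((fun p => (p : String × String).2) ∘
          fun row => (pvRowGet row "base", pvRowGet row "country_state")) X) := rfl
  rw [hkeys]
  apply List.map_congr_left
  intro s _
  simp only [Function.comp]
  rw [pvGetD_modifyFold]
  congr 1
  -- length of the accumulated set = number of distinct (base,state) pairs with state s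
  have h1 : PySem.Set.update (PySem.Dict.empty.getD s PySem.Set.empty)
        ((X.filter (fun r => pvRowGet r "country_state" == s)).map (fun r => pvRowGet r "base"))
      = PySem.Set.ofList ((X.filter (fun r => pvRowGet r "country_state" == s)).map (fun r => pvRowGet r "base")) := rfl
  rw [h1]
  have h2 : (PySem.List.dedup (X.map (fun row => (pvRowGet row "base", pvRowGet row "country_state")))).filter (fun p => p.2 == s)
      = PySem.Set.ofList ((X.map (fun row => (pvRowGet row "base", pvRowGet row "country_state"))).filter (fun p => p.2 == s)) := by
    rw [PySem.List.dedup_eq_ofList, pvOfList_filter]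
  have h3 : (X.map (fun row => (pvRowGet row "base", pvRowGet row "country_state"))).filter (fun p => p.2 == s)
      = ((X.filter (fun r => pvRowGet r "country_state" == s)).map (fun r => pvRowGet r "base")).map (fun b => (b, s)) := by
    rw [List.filter_map, List.map_map]
    apply List.map_congr_left
    intro r hr
    have : pvRowGet r "country_state" = s := by
      have := (List.mem_filter.mp hr).2
      simpa using this
    simp [Function.comp, this]
  rw [h2, h3, pvOfList_map (fun b => (b, s)) (fun a b h => congrArg Prod.fst h), List.length_map]
  rfl

theorem getOccurrenceByDate_spec : Claim_equal_getOccurrenceByDate := by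
  intro data date _ _
  show getOccurrenceByDate data date = getOccurrenceByDate_alt data date
  show [("states", (pvCountBasesByState (data.filter (fun row => pvRowGet row "date" == date))).items.map
            (fun p => (p.1, PySem.Set.len p.2))),
        ("bases", (pvCountBases (data.filter (fun row => pvRowGet row "date" == date))).items)]
      = [("states", (PySem.List.dedup (((data.filter (fun row => pvRowGet row "date" == date)).map
              (fun row => (pvRowGet row "base", pvRowGet row "country_state"))).map (fun p => p.2))).map
            (fun s => (s, (((PySem.List.dedup ((data.filter (fun row => pvRowGet row "date" == date)).map
              (fun row => (pvRowGet row "base", pvRowGet row "country_state")))).filter (fun p => p.2 == s)).length : Int)))),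
         ("bases", (PySem.List.dedup (((data.filter (fun row => pvRowGet row "date" == date)).map
              (fun row => (pvRowGet row "base", pvRowGet row "country_state"))).map (fun p => p.1))).map
            (fun b => (b, ((((data.filter (fun row => pvRowGet row "date" == date)).map
              (fun row => (pvRowGet row "base", pvRowGet row "country_state"))).filter (fun p => p.1 == b)).length : Int))))]
  rw [pvStates_eq, pvBases_eq]

-- ===== VERDICT kept as the theorem above (stated by name) =====
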